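-- pv_equiv track=rewrite | github.com/MrBrantCode/unitest_baseline | mut_generate/mist_train_cf/cf_68009/solution.py | remove_repeated_palindrome
-- ===== SOURCE A (Python) =====
-- def remove_repeated_palindrome(input_string):
--     def find_largest_palindrome(s):
--         max_length = 0
--         start = 0
--         for i in range(len(s)):
--             for j in range(i+max_length, len(s)):
--                 if s[i:j+1] == s[i:j+1][::-1]:
--                     if max_length < j-i+1:
--                         max_length = j-i+1
--                         start = i
--         return s[start:start+max_length]
--
--     max_palindrome = find_largest_palindrome(input_string)
--     count = input_string.count(max_palindrome)
--     if count > 1: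
--         input_string = input_string.replace(max_palindrome, "", count-1)
--     return input_string
-- ===== SOURCE B (Python) =====
-- def remove_repeated_palindrome(input_string):
--     s = input_string
--     n = len(s)
--     best_start, best_len = 0, 0
--     for c in range(n):
--         # longest odd-length palindrome centered at c
--         l, r = c, c
--         while l > 0 and r + 1 < n and s[l - 1] == s[r + 1]:
--             l -= 1
--             r += 1
--         if r - l + 1 > best_len:
--             best_start, best_len = l, r - l + 1
--         # longest even-length palindrome centered between c and c+1
--         if c + 1 < n and s[c] == s[c + 1]:
--             l, r = c, c + 1
--             while l > 0 and r + 1 < n and s[l - 1] == s[r + 1]: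
--                 l -= 1
--                 r += 1
--             if r - l + 1 > best_len:
--                 best_start, best_len = l, r - l + 1
--     p = s[best_start:best_start + best_len]
--     count = s.count(p)
--     if count > 1:
--         s = s.replace(p, "", count - 1)
--     return s
-- ===== Notes on version B (the rewrite author's own statement) =====
-- stated objective: faster
-- what changed: Replaces the O(n^3)-ish all-substrings scan (every i, every j, full slice-reverse comparison) with expand-around-center: for each of the 2n-1 centers grow the maximal palindrome by one character comparison per step, keeping the earliest longest; the count/limited-replace tail is unchanged.
import Mathlib
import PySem

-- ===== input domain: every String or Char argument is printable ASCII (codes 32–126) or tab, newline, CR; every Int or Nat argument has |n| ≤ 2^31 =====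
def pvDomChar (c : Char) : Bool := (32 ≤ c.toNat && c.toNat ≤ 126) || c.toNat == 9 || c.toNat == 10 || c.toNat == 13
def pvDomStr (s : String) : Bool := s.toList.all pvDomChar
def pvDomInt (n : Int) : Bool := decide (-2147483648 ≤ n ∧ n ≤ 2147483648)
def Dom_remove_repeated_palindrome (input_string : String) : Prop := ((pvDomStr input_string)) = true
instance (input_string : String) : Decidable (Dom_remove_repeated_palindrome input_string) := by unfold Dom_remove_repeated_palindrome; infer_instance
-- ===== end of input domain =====

-- B replaces A's scan over all substrings (with a full slice-reverse comparison each) by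
-- expand-around-center over the 2n-1 centers, keeping the earliest longest palindrome;
-- the count / limited-replace tail is unchanged.


-- ===== PORT A =====

-- hand port of CPython's `s.replace(old, "", k)` (count-limited replace, new = "");
-- exact for old ≠ '' (the only way both programs reach it): remove the first k
-- leftmost non-overlapping occurrences of old.
def pvReplaceCount (s old : List Char) (k : Nat) : List Char :=
  match k with
  | 0 => s
  | k + 1 =>
    let f := PySem.Chars.find s old
    if f < 0 then s
    else (s.take f.toNat) ++ pvReplaceCount (s.drop (f.toNat + old.length)) old k

-- find_largest_palindrome's loops: state (max_length, start)
def pvFindA (cs : List Char) : Int × Int :=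
  (PySem.List.pyRange 0 cs.length 1).foldl
    (fun (st : Int × Int) (i : Int) =>
      (PySem.List.pyRange (i + st.1) cs.length 1).foldl
        (fun (st2 : Int × Int) (j : Int) =>
          let t := PySem.List.slice cs (some i) (some (j + 1))
          if t.reverse = t then                 -- s[i:j+1] == s[i:j+1][::-1]
            if st2.1 < j - i + 1 then (j - i + 1, i) else st2
          else st2)
        st)
    (0, 0)

def remove_repeated_palindrome (input_string : String) : String :=
  let cs := input_string.toList
  let r := pvFindA cs
  let p := PySem.List.slice cs (some r.2) (some (r.2 + r.1))   -- s[start:start+max_length]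
  let cnt := PySem.Chars.count cs p
  if 1 < cnt then String.ofList (pvReplaceCount cs p (cnt - 1)) else input_string

-- ===== PORT B =====

-- while l > 0 and r + 1 < n and s[l-1] == s[r+1]: l -= 1; r += 1   (indices are all ≥ 0, so Nat)
def pvExpand (cs : List Char) (l r : Nat) : Nat × Nat :=
  if h : 0 < l ∧ r + 1 < cs.length ∧ cs[l - 1]? = cs[r + 1]? then
    pvExpand cs (l - 1) (r + 1)
  else (l, r)
termination_by l
decreasing_by omega

-- state (best_start, best_len)
def pvFindB (cs : List Char) : Nat × Nat :=
  (List.range cs.length).foldl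
    (fun (b : Nat × Nat) (c : Nat) =>
      let e1 := pvExpand cs c c
      let b1 := if b.2 < e1.2 - e1.1 + 1 then (e1.1, e1.2 - e1.1 + 1) else b
      if c + 1 < cs.length ∧ cs[c]? = cs[c + 1]? then
        let e2 := pvExpand cs c (c + 1)
        if b1.2 < e2.2 - e2.1 + 1 then (e2.1, e2.2 - e2.1 + 1) else b1
      else b1)
    (0, 0)

def remove_repeated_palindrome_alt (input_string : String) : String :=
  let cs := input_string.toList
  let b := pvFindB cs
  let p := (cs.drop b.1).take b.2                 -- s[best_start:best_start+best_len]
  let cnt := PySem.Chars.count cs p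
  if 1 < cnt then String.ofList (pvReplaceCount cs p (cnt - 1)) else input_string

-- ===== PRECONDITION & SPEC =====
def Spec_remove_repeated_palindrome (input_string : String) (out : String) : Prop := out = remove_repeated_palindrome_alt input_string
instance (input_string : String) (out : String) : Decidable (Spec_remove_repeated_palindrome input_string out) := by unfold Spec_remove_repeated_palindrome; infer_instance

-- ===== CLAIM (what is proved, stated in full; the proofs are below) =====
def Claim_equal_remove_repeated_palindrome : Prop := ∀ (input_string : String), Dom_remove_repeated_palindrome input_string → Spec_remove_repeated_palindrome input_string (remove_repeated_palindrome input_string)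

-- ===== LEMMAS AND PROOFS =====

-- `cs[i:i+L]` is a palindrome (Bool-valued so it can sit under Nat.findGreatest)
def pvPal (cs : List Char) (i L : Nat) : Bool :=
  decide (i + L ≤ cs.length) && ((cs.drop i).take L).reverse == (cs.drop i).take L

-- the center of the palindrome starting at i with length L (left middle for even L)
def pvCen (i L : Nat) : Nat := i + (L - 1) / 2

-- Nat-level mirror of pvFindA's loops (proof helper)
def pvStepN (cs : List Char) (i : Nat) (st2 : Nat × Nat) (j : Nat) : Nat × Nat :=
  let t := (cs.drop i).take (j + 1 - i)
  if t.reverse = t then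
    if st2.1 < j - i + 1 then (j - i + 1, i) else st2
  else st2

def pvFindAN (cs : List Char) : Nat × Nat :=
  (List.range cs.length).foldl
    (fun st i =>
      (List.range' (i + st.1) (cs.length - (i + st.1))).foldl (pvStepN cs i) st)
    (0, 0)

-- invariants
def pvStA (cs : List Char) (k : Nat) (b : Nat × Nat) : Prop :=
  (b = (0, 0) ∧ ∀ i L, i < k → 1 ≤ L → ¬ pvPal cs i L) ∨
  (1 ≤ b.1 ∧ b.2 < k ∧ pvPal cs b.2 b.1 ∧
    (∀ i L, i < k → pvPal cs i L → L ≤ b.1) ∧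
    (∀ i, i < k → pvPal cs i b.1 → b.2 ≤ i))

def pvStB (cs : List Char) (k : Nat) (b : Nat × Nat) : Prop :=
  (b = (0, 0) ∧ ∀ i L, 1 ≤ L → pvPal cs i L → ¬ pvCen i L < k) ∨
  (1 ≤ b.2 ∧ pvPal cs b.1 b.2 ∧ pvCen b.1 b.2 < k ∧
    (∀ i L, pvPal cs i L → pvCen i L < k → L ≤ b.2) ∧
    (∀ i, pvPal cs i b.2 → pvCen i b.2 < k → b.1 ≤ i))

theorem pvPal_zero (cs : List Char) (i : Nat) (h : i ≤ cs.length) : pvPal cs i 0 := by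
  simp [pvPal, h]

theorem pvPal_one (cs : List Char) (i : Nat) (h : i < cs.length) : pvPal cs i 1 := by
  have hd : cs.drop i ≠ [] := by
    intro hn
    have := congrArg List.length hn
    simp at this
    omega
  obtain ⟨a, t, he⟩ := List.exists_cons_of_ne_nil hd
  simp [pvPal, he]
  omega

theorem pvTake_decomp (cs : List Char) (i L : Nat) (h : i + L + 2 ≤ cs.length) :
    (cs.drop i).take (L + 2) =
      cs[i]'(by omega) :: (((cs.drop (i + 1)).take L) ++ [cs[i + L + 1]'(by omega)]) := by
  have h1 : cs.drop i = cs[i]'(by omega) :: cs.drop (i + 1) := by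
    rw [List.drop_eq_getElem_cons (by omega)]
  have h2 : (cs.drop (i + 1))[L]? = some (cs[i + L + 1]'(by omega)) := by
    rw [List.getElem?_drop]
    have e : i + 1 + L = i + L + 1 := by omega
    rw [e, List.getElem?_eq_getElem (by omega)]
  rw [h1, List.take_succ_cons, List.take_add_one, h2]
  rfl

theorem pvPalCons (a b : Char) (t : List Char) :
    ((a :: (t ++ [b])).reverse = a :: (t ++ [b])) ↔ (a = b ∧ t.reverse = t) := by
  constructor
  · intro h
    simp only [List.reverse_cons, List.reverse_append, List.cons_append,
      List.append_assoc] at h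
    obtain ⟨h1, h2⟩ := List.cons.inj h
    refine ⟨h1.symm, ?_⟩
    subst h1
    exact List.append_cancel_right h2
  · rintro ⟨rfl, h2⟩
    simp [List.reverse_cons, List.reverse_append, h2]

theorem pvPal_iff (cs : List Char) (i L : Nat) (h : i + L + 2 ≤ cs.length) :
    pvPal cs i (L + 2) = true ↔
      (cs[i]? = cs[i + L + 1]? ∧ pvPal cs (i + 1) L = true) := by
  have hg1 : cs[i]? = some (cs[i]'(by omega)) := List.getElem?_eq_getElem (by omega)
  have hg2 : cs[i + L + 1]? = some (cs[i + L + 1]'(by omega)) :=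
    List.getElem?_eq_getElem (by omega)
  simp only [pvPal, Bool.and_eq_true, decide_eq_true_iff, beq_iff_eq]
  rw [pvTake_decomp cs i L h]
  rw [pvPalCons]
  rw [hg1, hg2]
  constructor
  · rintro ⟨hb, ha, ht⟩
    exact ⟨by rw [ha], by omega, ht⟩
  · rintro ⟨hab, hb, ht⟩
    refine ⟨by omega, ?_, ht⟩
    have := Option.some.inj hab
    exact this

theorem pvPal_two (cs : List Char) (i : Nat) (h : i + 2 ≤ cs.length)
    (hc : cs[i]? = cs[i + 1]?) : pvPal cs i 2 := by
  rw [show (2 : Nat) = 0 + 2 by rfl, pvPal_iff cs i 0 (by omega)]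
  exact ⟨hc, pvPal_zero cs (i + 1) (by omega)⟩

theorem pvPal_extend (cs : List Char) (i L : Nat) (hp : pvPal cs i L) (h1 : 1 ≤ i)
    (h2 : i + L + 1 ≤ cs.length) (hc : cs[i - 1]? = cs[i + L]?) :
    pvPal cs (i - 1) (L + 2) := by
  obtain ⟨i', rfl⟩ : ∃ i', i = i' + 1 := ⟨i - 1, by omega⟩
  simp only [Nat.add_sub_cancel]
  rw [pvPal_iff cs i' L (by omega)]
  have e1 : i' + 1 - 1 = i' := by omega
  have e2 : i' + 1 + L = i' + L + 1 := by omega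
  rw [e1, e2] at hc
  exact ⟨hc, hp⟩

theorem pvPal_shrink (cs : List Char) (i L : Nat) (hp : pvPal cs i (L + 2)) :
    pvPal cs (i + 1) L ∧ cs[i]? = cs[i + L + 1]? := by
  have hb : i + L + 2 ≤ cs.length := by
    have := (Bool.and_eq_true _ _).mp hp |>.1
    simp only [decide_eq_true_iff] at this
    omega
  rw [pvPal_iff cs i L hb] at hp
  exact ⟨hp.2, hp.1⟩

theorem pvPal_len (cs : List Char) (i L : Nat) (hp : pvPal cs i L) :
    i + L ≤ cs.length := by
  have := (Bool.and_eq_true _ _).mp hp |>.1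
  simpa using this

theorem pvPal_shrink_chain (cs : List Char) (i L k : Nat) (hk : 2 * k ≤ L)
    (hp : pvPal cs i L) : pvPal cs (i + k) (L - 2 * k) := by
  induction k generalizing i L with
  | zero => simpa using hp
  | succ k ih =>
    obtain ⟨L', rfl⟩ : ∃ L', L = L' + 2 := ⟨L - 2, by omega⟩
    have h1 := (pvPal_shrink cs i L' hp).1
    have := ih (i + 1) L' (by omega) h1
    convert this using 2 <;> omega

-- expand facts
theorem pvExpand_sum (cs : List Char) (l r : Nat) :
    (pvExpand cs l r).1 + (pvExpand cs l r).2 = l + r := by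
  fun_induction pvExpand cs l r with
  | case1 l r h ih => omega
  | case2 l r h => simp

theorem pvExpand_le (cs : List Char) (l r : Nat) :
    (pvExpand cs l r).1 ≤ l ∧ r ≤ (pvExpand cs l r).2 := by
  fun_induction pvExpand cs l r with
  | case1 l r h ih => omega
  | case2 l r h => simp

theorem pvExpand_stop (cs : List Char) (l r : Nat) :
    ¬ (0 < (pvExpand cs l r).1 ∧ (pvExpand cs l r).2 + 1 < cs.length ∧
        cs[(pvExpand cs l r).1 - 1]? = cs[(pvExpand cs l r).2 + 1]?) := by
  fun_induction pvExpand cs l r with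
  | case1 l r h ih => exact ih
  | case2 l r h => simpa using h

theorem pvExpand_pal (cs : List Char) (l r : Nat) (hlr : l ≤ r)
    (hp : pvPal cs l (r - l + 1)) :
    pvPal cs (pvExpand cs l r).1 ((pvExpand cs l r).2 - (pvExpand cs l r).1 + 1) ∧
      (pvExpand cs l r).1 ≤ (pvExpand cs l r).2 := by
  fun_induction pvExpand cs l r with
  | case1 l r h ih =>
    obtain ⟨hl, hr, hc⟩ := h
    have hc2 : cs[l - 1]? = cs[l + (r - l + 1)]? := by
      have e : l + (r - l + 1) = r + 1 := by omega
      rw [e]; exact hc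
    have hext := pvPal_extend cs l (r - l + 1) hp hl (by omega) hc2
    have hext' : pvPal cs (l - 1) (r + 1 - (l - 1) + 1) := by
      have e2 : r + 1 - (l - 1) + 1 = (r - l + 1) + 2 := by omega
      rw [e2]; exact hext
    exact ih (by omega) hext'
  | case2 l r h => exact ⟨hp, hlr⟩

theorem pvExpand_max (cs : List Char) (l r : Nat) (hlr : l ≤ r) (i L : Nat) (hL : 1 ≤ L)
    (hsum : i + (i + L - 1) = l + r) (hp : pvPal cs i L) :
    L ≤ (pvExpand cs l r).2 - (pvExpand cs l r).1 + 1 := by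
  by_contra hgt
  push Not at hgt
  have hsumE := pvExpand_sum cs l r
  have hleE := pvExpand_le cs l r
  have hstop := pvExpand_stop cs l r
  set E1 := (pvExpand cs l r).1 with hE1
  set E2 := (pvExpand cs l r).2 with hE2
  have hE12 : E1 ≤ E2 := by omega
  have hiE : i < E1 := by omega
  have hk : 2 * (E1 - 1 - i) ≤ L := by omega
  have p2 := pvPal_shrink_chain cs i L (E1 - 1 - i) hk hp
  have e1 : i + (E1 - 1 - i) = E1 - 1 := by omega
  have e2 : L - 2 * (E1 - 1 - i) = (E2 - E1 + 1) + 2 := by omega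
  rw [e1, e2] at p2
  have hlen := pvPal_len cs (E1 - 1) ((E2 - E1 + 1) + 2) p2
  have p3 := pvPal_shrink cs (E1 - 1) (E2 - E1 + 1) p2
  apply hstop
  refine ⟨by omega, by omega, ?_⟩
  have e3 : (E1 - 1) + (E2 - E1 + 1) + 1 = E2 + 1 := by omega
  have := p3.2
  rw [e3] at this
  have e4 : E1 - 1 = E1 - 1 := rfl
  exact this

-- A's inner loop computes the longest palindrome starting at k (if longer than m)
theorem pvInnerA (cs : List Char) (k : Nat) :
    ∀ (c m st : Nat), k + m + c ≤ cs.length →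
      (List.range' (k + m) c).foldl (pvStepN cs k) (m, st) =
        if m < Nat.findGreatest (fun L => pvPal cs k L = true) (m + c) then
          (Nat.findGreatest (fun L => pvPal cs k L = true) (m + c), k)
        else (m, st) := by
  intro c
  induction c with
  | zero =>
    intro m st _
    have hle : Nat.findGreatest (fun L => pvPal cs k L = true) m ≤ m :=
      Nat.findGreatest_le m
    simp only [List.range', List.foldl_nil, Nat.add_zero]
    rw [if_neg (by omega)]
  | succ c ih =>
    intro m st h
    rw [List.range'_1_concat, List.foldl_append, ih m st (by omega)]
    simp only [List.foldl_cons, List.foldl_nil]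
    have hGle : Nat.findGreatest (fun L => pvPal cs k L = true) (m + c) ≤ m + c :=
      Nat.findGreatest_le (m + c)
    have hbnd : k + (m + c + 1) ≤ cs.length := by omega
    have hsucc : Nat.findGreatest (fun L => pvPal cs k L = true) (m + (c + 1)) =
        if pvPal cs k (m + c + 1) = true then m + c + 1
        else Nat.findGreatest (fun L => pvPal cs k L = true) (m + c) := by
      have : m + (c + 1) = (m + c) + 1 := by omega
      rw [this, Nat.findGreatest_succ]
    have htest : (((cs.drop k).take (k + m + c + 1 - k)).reverse =
        (cs.drop k).take (k + m + c + 1 - k)) ↔ pvPal cs k (m + c + 1) = true := by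
      have e : k + m + c + 1 - k = m + c + 1 := by omega
      rw [e]
      simp [pvPal, hbnd]
    by_cases hP : pvPal cs k (m + c + 1) = true
    · rw [hsucc, if_pos hP]
      have e2 : k + m + c - k + 1 = m + c + 1 := by omega
      by_cases hm : m < Nat.findGreatest (fun L => pvPal cs k L = true) (m + c)
      · rw [if_pos hm]
        simp only [pvStepN]
        rw [if_pos (htest.mpr hP), e2]
        rw [if_pos (show Nat.findGreatest (fun L => pvPal cs k L = true) (m + c) <
          m + c + 1 by omega)]
        rw [if_pos (show m < m + c + 1 by omega)]
      · rw [if_neg hm]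
        simp only [pvStepN]
        rw [if_pos (htest.mpr hP), e2]
    · rw [hsucc, if_neg hP]
      have hstep : ∀ (x : Nat × Nat), pvStepN cs k x (k + m + c) = x := by
        intro x
        simp only [pvStepN]
        rw [if_neg (fun hx => hP (htest.mp hx))]
      by_cases hm : m < Nat.findGreatest (fun L => pvPal cs k L = true) (m + c)
      · rw [if_pos hm]
        exact hstep _
      · rw [if_neg hm]
        exact hstep _

theorem pvStA_step (cs : List Char) (k : Nat) (hk : k < cs.length) (m st : Nat)
    (h : pvStA cs k (m, st)) :
    pvStA cs (k + 1)
      ((List.range' (k + m) (cs.length - (k + m))).foldl (pvStepN cs k) (m, st)) := by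
  by_cases hmn : k + m ≤ cs.length
  · rw [pvInnerA cs k (cs.length - (k + m)) m st (by omega)]
    have e : m + (cs.length - (k + m)) = cs.length - k := by omega
    rw [e]
    set G := Nat.findGreatest (fun L => pvPal cs k L = true) (cs.length - k) with hGdef
    have hG1 : 1 ≤ G := Nat.le_findGreatest (by omega) (pvPal_one cs k hk)
    have hGpal : pvPal cs k G = true :=
      Nat.findGreatest_spec (P := fun L => pvPal cs k L = true)
        (by omega : 1 ≤ cs.length - k) (pvPal_one cs k hk)
    have hGmax : ∀ L, pvPal cs k L = true → L ≤ G := fun L hL =>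
      Nat.le_findGreatest (by have := pvPal_len cs k L hL; omega) hL
    by_cases hm : m < G
    · rw [if_pos hm]
      right
      refine ⟨by omega, by omega, hGpal, ?_, ?_⟩
      · intro i L hi hL
        rcases Nat.lt_succ_iff_lt_or_eq.mp hi with hik | rfl
        · rcases h with ⟨_, hnone⟩ | ⟨hm1, _, _, hmax, _⟩
          · rcases Nat.eq_zero_or_pos L with rfl | hL1
            · omega
            · exact absurd hL (hnone i L hik hL1)
          · have := hmax i L hik hL
            omega
        · exact hGmax L hL
      · intro i hi hL
        rcases Nat.lt_succ_iff_lt_or_eq.mp hi with hik | rfl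
        · rcases h with ⟨_, hnone⟩ | ⟨hm1, _, _, hmax, _⟩
          · exact absurd hL (hnone i G hik (by omega))
          · have := hmax i G hik hL
            omega
        · omega
    · rw [if_neg hm]
      rcases h with ⟨hb, hnone⟩ | ⟨hm1, hst, hpal, hmax, hmin⟩
      · exfalso
        obtain ⟨rfl, rfl⟩ := Prod.mk.inj hb
        omega
      · right
        refine ⟨hm1, by omega, hpal, ?_, ?_⟩
        · intro i L hi hL
          rcases Nat.lt_succ_iff_lt_or_eq.mp hi with hik | rfl
          · exact hmax i L hik hL
          · have := hGmax L hL
            omega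
        · intro i hi hL
          rcases Nat.lt_succ_iff_lt_or_eq.mp hi with hik | rfl
          · exact hmin i hik hL
          · omega
  · have hzero : cs.length - (k + m) = 0 := by omega
    rw [hzero]
    simp only [List.range', List.foldl_nil]
    rcases h with ⟨hb, hnone⟩ | ⟨hm1, hst, hpal, hmax, hmin⟩
    · exfalso
      obtain ⟨rfl, rfl⟩ := Prod.mk.inj hb
      omega
    · right
      refine ⟨hm1, by omega, hpal, ?_, ?_⟩
      · intro i L hi hL
        rcases Nat.lt_succ_iff_lt_or_eq.mp hi with hik | rfl
        · exact hmax i L hik hL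
        · have := pvPal_len cs i L hL
          omega
      · intro i hi hL
        rcases Nat.lt_succ_iff_lt_or_eq.mp hi with hik | rfl
        · exact hmin i hik hL
        · have := pvPal_len cs i m hL
          omega

theorem pvStA_fold (cs : List Char) : ∀ k, k ≤ cs.length →
    pvStA cs k ((List.range k).foldl
      (fun st i =>
        (List.range' (i + st.1) (cs.length - (i + st.1))).foldl (pvStepN cs i) st)
      (0, 0)) := by
  intro k
  induction k with
  | zero =>
    intro _
    exact Or.inl ⟨rfl, fun i L hi _ _ => absurd hi (by omega)⟩
  | succ k ih =>
    intro hk1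
    rw [List.range_succ, List.foldl_append]
    simp only [List.foldl_cons, List.foldl_nil]
    have ih' := ih (by omega)
    rcases hB : ((List.range k).foldl
      (fun st i =>
        (List.range' (i + st.1) (cs.length - (i + st.1))).foldl (pvStepN cs i) st)
      (0, 0)) with ⟨m, st⟩
    rw [hB] at ih' ⊢
    exact pvStA_step cs k (by omega) m st ih'

theorem pvStA_final (cs : List Char) : pvStA cs cs.length (pvFindAN cs) := by
  exact pvStA_fold cs cs.length le_rfl

theorem pvStB_post (cs : List Char) (c : Nat) (b v : Nat × Nat) (h : pvStB cs c b)
    (hpal : pvPal cs v.1 v.2) (h1 : 1 ≤ v.2)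
    (hcen : pvCen v.1 v.2 < c + 1)
    (hmax : ∀ i L, pvPal cs i L = true → pvCen i L < c + 1 → L ≤ v.2)
    (hvb : v = b ∨ (pvCen v.1 v.2 = c ∧ b.2 < v.2)) :
    pvStB cs (c + 1) v := by
  right
  refine ⟨h1, hpal, hcen, hmax, ?_⟩
  intro i hipal hicen
  rcases hvb with rfl | ⟨hvc, hbv⟩
  · rcases h with ⟨hb0, _⟩ | ⟨_, _, hc3, _, hmin⟩
    · rw [hb0] at h1
      exact absurd h1 (by omega)
    · by_cases hlt : pvCen i v.2 < c
      · exact hmin i hipal hlt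
      · have : pvCen i v.2 = c := by omega
        simp only [pvCen] at hc3 this
        omega
  · by_cases hlt : pvCen i v.2 < c
    · exfalso
      rcases h with ⟨_, hnone⟩ | ⟨_, _, _, hmax4, _⟩
      · exact hnone i v.2 (by omega) hipal hlt
      · have := hmax4 i v.2 hipal hlt
        omega
    · have hce : pvCen i v.2 = c := by omega
      simp only [pvCen] at hce hvc
      omega

theorem pvNoEven (cs : List Char) (c : Nat)
    (hg : ¬ (c + 1 < cs.length ∧ cs[c]? = cs[c + 1]?)) :
    ∀ i L, 1 ≤ L → L % 2 = 0 → pvPal cs i L = true → pvCen i L ≠ c := by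
  intro i L hL hpar hpal hcen
  simp only [pvCen] at hcen
  have hk : 2 * ((L - 2) / 2) ≤ L := by omega
  have p2 := pvPal_shrink_chain cs i L ((L - 2) / 2) hk hpal
  have e1 : i + (L - 2) / 2 = c := by omega
  have e2 : L - 2 * ((L - 2) / 2) = 0 + 2 := by omega
  rw [e1, e2] at p2
  have hlen := pvPal_len cs c (0 + 2) p2
  have p3 := pvPal_shrink cs c 0 p2
  exact hg ⟨by omega, by simpa using p3.2⟩

theorem pvStB_step (cs : List Char) (c : Nat) (hc : c < cs.length) (b : Nat × Nat)
    (h : pvStB cs c b) :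
    pvStB cs (c + 1)
      (let e1 := pvExpand cs c c
       let b1 := if b.2 < e1.2 - e1.1 + 1 then (e1.1, e1.2 - e1.1 + 1) else b
       if c + 1 < cs.length ∧ cs[c]? = cs[c + 1]? then
         let e2 := pvExpand cs c (c + 1)
         if b1.2 < e2.2 - e2.1 + 1 then (e2.1, e2.2 - e2.1 + 1) else b1
       else b1) := by
  -- odd-candidate facts
  have hp1 : pvPal cs c (c - c + 1) = true := by
    have : c - c + 1 = 1 := by omega
    rw [this]
    exact pvPal_one cs c hc
  have hE1 := pvExpand_pal cs c c le_rfl hp1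
  have hS1 := pvExpand_sum cs c c
  set e1 := pvExpand cs c c with he1
  set L1 := e1.2 - e1.1 + 1 with hL1def
  have hL1pos : 1 ≤ L1 := by omega
  have hcen1 : pvCen e1.1 L1 = c := by
    simp only [pvCen, hL1def]
    omega
  have hmax1 : ∀ i L, 1 ≤ L → L % 2 = 1 → pvPal cs i L = true → pvCen i L = c → L ≤ L1 := by
    intro i L hL hpar hpal hcen
    simp only [pvCen] at hcen
    exact pvExpand_max cs c c le_rfl i L hL (by omega) hpal
  -- old-best monotonicity helper
  have hold : ∀ i L, pvPal cs i L = true → pvCen i L < c → L ≤ b.2 := by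
    intro i L hpal hcen
    rcases h with ⟨_, hnone⟩ | ⟨_, _, _, hmax4, _⟩
    · rcases Nat.eq_zero_or_pos L with rfl | hL1
      · omega
      · exact absurd hcen (by simpa using hnone i L hL1 hpal)
    · exact hmax4 i L hpal hcen
  by_cases hg : c + 1 < cs.length ∧ cs[c]? = cs[c + 1]?
  · -- even-candidate facts
    have hp2 : pvPal cs c (c + 1 - c + 1) = true := by
      have : c + 1 - c + 1 = 2 := by omega
      rw [this]
      exact pvPal_two cs c (by omega) hg.2
    have hE2 := pvExpand_pal cs c (c + 1) (by omega) hp2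
    have hS2 := pvExpand_sum cs c (c + 1)
    set e2 := pvExpand cs c (c + 1) with he2
    set L2 := e2.2 - e2.1 + 1 with hL2def
    have hL2pos : 1 ≤ L2 := by omega
    have hcen2 : pvCen e2.1 L2 = c := by
      simp only [pvCen, hL2def]
      omega
    have hmax2 : ∀ i L, 1 ≤ L → L % 2 = 0 → pvPal cs i L = true → pvCen i L = c → L ≤ L2 := by
      intro i L hL hpar hpal hcen
      simp only [pvCen] at hcen
      exact pvExpand_max cs c (c + 1) (by omega) i L hL (by omega) hpal
    show pvStB cs (c + 1)
      (if c + 1 < cs.length ∧ cs[c]? = cs[c + 1]? then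
         if (if b.2 < L1 then (e1.1, L1) else b).2 < L2 then (e2.1, L2)
         else (if b.2 < L1 then (e1.1, L1) else b)
       else (if b.2 < L1 then (e1.1, L1) else b))
    rw [if_pos hg]
    by_cases hc1 : b.2 < L1
    · rw [if_pos hc1]
      by_cases hc2 : (e1.1, L1).2 < L2
      · rw [if_pos hc2]
        simp only at hc2
        refine pvStB_post cs c b (e2.1, L2) h hE2.1 hL2pos (by show pvCen e2.1 L2 < c + 1; omega) ?_ (Or.inr ⟨hcen2, by omega⟩)
        intro i L hpal hcen
        rcases Nat.eq_zero_or_pos L with rfl | hLpos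
        · omega
        by_cases hlt : pvCen i L < c
        · have := hold i L hpal hlt
          omega
        · have hce : pvCen i L = c := by omega
          rcases Nat.mod_two_eq_zero_or_one L with hpar | hpar
          · exact hmax2 i L hLpos hpar hpal hce
          · have := hmax1 i L hLpos hpar hpal hce
            omega
      · rw [if_neg hc2]
        simp only at hc2
        refine pvStB_post cs c b (e1.1, L1) h hE1.1 hL1pos (by show pvCen e1.1 L1 < c + 1; omega) ?_ (Or.inr ⟨hcen1, hc1⟩)
        intro i L hpal hcen
        rcases Nat.eq_zero_or_pos L with rfl | hLpos
        · omega
        by_cases hlt : pvCen i L < c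
        · have := hold i L hpal hlt
          omega
        · have hce : pvCen i L = c := by omega
          rcases Nat.mod_two_eq_zero_or_one L with hpar | hpar
          · have := hmax2 i L hLpos hpar hpal hce
            omega
          · exact hmax1 i L hLpos hpar hpal hce
    · rw [if_neg hc1]
      by_cases hc2 : b.2 < L2
      · rw [if_pos hc2]
        refine pvStB_post cs c b (e2.1, L2) h hE2.1 hL2pos (by show pvCen e2.1 L2 < c + 1; omega) ?_ (Or.inr ⟨hcen2, hc2⟩)
        intro i L hpal hcen
        rcases Nat.eq_zero_or_pos L with rfl | hLpos
        · omega
        by_cases hlt : pvCen i L < c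
        · have := hold i L hpal hlt
          omega
        · have hce : pvCen i L = c := by omega
          rcases Nat.mod_two_eq_zero_or_one L with hpar | hpar
          · exact hmax2 i L hLpos hpar hpal hce
          · have := hmax1 i L hLpos hpar hpal hce
            omega
      · rw [if_neg hc2]
        have hbpal : pvPal cs b.1 b.2 = true := by
          rcases h with ⟨hb0, _⟩ | ⟨_, hp, _, _, _⟩
          · rw [hb0] at hc1 ⊢
            exact absurd hc1 (by omega)
          · exact hp
        have hbcen : pvCen b.1 b.2 < c + 1 := by
          rcases h with ⟨hb0, _⟩ | ⟨_, _, hc3, _, _⟩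
          · rw [hb0] at hc1
            exact absurd hc1 (by omega)
          · omega
        refine pvStB_post cs c b b h hbpal (by omega) hbcen ?_ (Or.inl rfl)
        intro i L hpal hcen
        rcases Nat.eq_zero_or_pos L with rfl | hLpos
        · omega
        by_cases hlt : pvCen i L < c
        · exact hold i L hpal hlt
        · have hce : pvCen i L = c := by omega
          rcases Nat.mod_two_eq_zero_or_one L with hpar | hpar
          · have := hmax2 i L hLpos hpar hpal hce
            omega
          · have := hmax1 i L hLpos hpar hpal hce
            omega
  · have hnoe := pvNoEven cs c hg
    show pvStB cs (c + 1)
      (if c + 1 < cs.length ∧ cs[c]? = cs[c + 1]? then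
         if (if b.2 < L1 then (e1.1, L1) else b).2 < (pvExpand cs c (c + 1)).2 - (pvExpand cs c (c + 1)).1 + 1 then
           ((pvExpand cs c (c + 1)).1, (pvExpand cs c (c + 1)).2 - (pvExpand cs c (c + 1)).1 + 1)
         else (if b.2 < L1 then (e1.1, L1) else b)
       else (if b.2 < L1 then (e1.1, L1) else b))
    rw [if_neg hg]
    have hmaxodd : ∀ i L, pvPal cs i L = true → pvCen i L < c + 1 → L ≤ max b.2 L1 := by
      intro i L hpal hcen
      rcases Nat.eq_zero_or_pos L with rfl | hLpos
      · omega
      by_cases hlt : pvCen i L < c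
      · have := hold i L hpal hlt
        omega
      · have hce : pvCen i L = c := by omega
        rcases Nat.mod_two_eq_zero_or_one L with hpar | hpar
        · exact absurd hce (hnoe i L hLpos hpar hpal)
        · have := hmax1 i L hLpos hpar hpal hce
          omega
    by_cases hc1 : b.2 < L1
    · rw [if_pos hc1]
      refine pvStB_post cs c b (e1.1, L1) h hE1.1 hL1pos (by show pvCen e1.1 L1 < c + 1; omega) ?_ (Or.inr ⟨hcen1, hc1⟩)
      intro i L hpal hcen
      have := hmaxodd i L hpal hcen
      simp only
      omega
    · rw [if_neg hc1]
      have hbpal : pvPal cs b.1 b.2 = true := by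
        rcases h with ⟨hb0, _⟩ | ⟨_, hp, _, _, _⟩
        · rw [hb0] at hc1 ⊢
          exact absurd hc1 (by omega)
        · exact hp
      have hbcen : pvCen b.1 b.2 < c + 1 := by
        rcases h with ⟨hb0, _⟩ | ⟨_, _, hc3, _, _⟩
        · rw [hb0] at hc1
          exact absurd hc1 (by omega)
        · omega
      refine pvStB_post cs c b b h hbpal (by omega) hbcen ?_ (Or.inl rfl)
      intro i L hpal hcen
      have := hmaxodd i L hpal hcen
      omega

theorem pvStB_fold (cs : List Char) : ∀ k, k ≤ cs.length →
    pvStB cs k ((List.range k).foldl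
      (fun (b : Nat × Nat) (c : Nat) =>
        let e1 := pvExpand cs c c
        let b1 := if b.2 < e1.2 - e1.1 + 1 then (e1.1, e1.2 - e1.1 + 1) else b
        if c + 1 < cs.length ∧ cs[c]? = cs[c + 1]? then
          let e2 := pvExpand cs c (c + 1)
          if b1.2 < e2.2 - e2.1 + 1 then (e2.1, e2.2 - e2.1 + 1) else b1
        else b1)
      (0, 0)) := by
  intro k
  induction k with
  | zero =>
    intro _
    exact Or.inl ⟨rfl, fun i L _ _ hcen => absurd hcen (by omega)⟩
  | succ k ih =>
    intro hk1
    rw [List.range_succ, List.foldl_append]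
    simp only [List.foldl_cons, List.foldl_nil]
    exact pvStB_step cs k (by omega) _ (ih (by omega))

theorem pvStB_final (cs : List Char) : pvStB cs cs.length (pvFindB cs) := by
  exact pvStB_fold cs cs.length le_rfl

theorem pvFindAN_eq (cs : List Char) :
    pvFindAN cs = ((pvFindB cs).2, (pvFindB cs).1) := by
  have hA := pvStA_final cs
  have hB := pvStB_final cs
  rcases hA with ⟨ha0, hanone⟩ | ⟨ha1, ha2, ha3, ha4, ha5⟩
  · rcases hB with ⟨hb0, hbnone⟩ | ⟨hb1, hb2, hb3, hb4, hb5⟩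
    · rw [ha0, hb0]
    · exfalso
      have hlen := pvPal_len cs (pvFindB cs).1 (pvFindB cs).2 hb2
      exact hanone (pvFindB cs).1 (pvFindB cs).2 (by omega) hb1 hb2
  · rcases hB with ⟨hb0, hbnone⟩ | ⟨hb1, hb2, hb3, hb4, hb5⟩
    · exfalso
      have hlen := pvPal_len cs (pvFindAN cs).2 (pvFindAN cs).1 ha3
      refine hbnone (pvFindAN cs).2 (pvFindAN cs).1 ha1 ha3 ?_
      simp only [pvCen]
      omega
    · have hlenB := pvPal_len cs (pvFindB cs).1 (pvFindB cs).2 hb2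
      have hlenA := pvPal_len cs (pvFindAN cs).2 (pvFindAN cs).1 ha3
      have h1 : (pvFindAN cs).1 ≤ (pvFindB cs).2 := by
        refine hb4 (pvFindAN cs).2 (pvFindAN cs).1 ha3 ?_
        simp only [pvCen]
        omega
      have h2 : (pvFindB cs).2 ≤ (pvFindAN cs).1 := ha4 (pvFindB cs).1 (pvFindB cs).2 (by omega) hb2
      have hlen : (pvFindAN cs).1 = (pvFindB cs).2 := by omega
      have h3 : (pvFindAN cs).2 ≤ (pvFindB cs).1 := by
        refine ha5 (pvFindB cs).1 (by omega) ?_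
        rw [hlen]
        exact hb2
      have h4 : (pvFindB cs).1 ≤ (pvFindAN cs).2 := by
        refine hb5 (pvFindAN cs).2 ?_ ?_
        · rw [← hlen]
          exact ha3
        · rw [← hlen]
          simp only [pvCen]
          omega
      have hst : (pvFindAN cs).2 = (pvFindB cs).1 := by omega
      exact Prod.ext hlen hst

-- Int-fold to Nat-fold bridge
theorem pvRangeSplit (a b : Nat) (h : a ≤ b) :
    List.range a ++ List.range' a (b - a) = List.range b := by
  rw [List.range_eq_range', List.range_eq_range']
  have h2 := @List.range'_append 0 a (b - a) 1
  simp only [Nat.zero_add, Nat.one_mul] at h2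
  rw [h2]
  congr 1
  omega

theorem pvRangeCast (a b : Nat) :
    PySem.List.pyRange a b 1 = List.map (fun k : Nat => (k : Int)) (List.range' a (b - a)) := by
  by_cases hab : a ≤ b
  · have hsplit := PySem.List.pyRange_one_append 0 a b (by omega) (by omega)
    have h0a := PySem.List.pyRange_zero_natCast a
    have h0b := PySem.List.pyRange_zero_natCast b
    rw [← pvRangeSplit a b hab, List.map_append, ← h0a, hsplit] at h0b
    exact List.append_cancel_left h0b
  · have h1 : PySem.List.pyRange a b 1 = [] := by
      rw [List.eq_nil_iff_forall_not_mem]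
      intro x hx
      rw [PySem.List.mem_pyRange_one] at hx
      omega
    have h2 : b - a = 0 := by omega
    rw [h1, h2]
    rfl

theorem pvFoldlCast (f : Int × Int → Int → Int × Int) (g : Nat × Nat → Nat → Nat × Nat) :
    ∀ (l : List Nat) (init : Nat × Nat),
      (∀ (s : Nat × Nat) (j : Nat), j ∈ l → f (↑s.1, ↑s.2) ↑j = (↑(g s j).1, ↑(g s j).2)) →
      List.foldl f ((init.1 : Int), (init.2 : Int)) (List.map (fun k : Nat => (k : Int)) l) =
        (((List.foldl g init l).1 : Int), ((List.foldl g init l).2 : Int)) := by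
  intro l
  induction l with
  | nil => intro init _; rfl
  | cons x xs ih =>
    intro init hpt
    simp only [List.map_cons, List.foldl_cons]
    rw [hpt init x (by simp)]
    exact ih (g init x) (fun s j hj => hpt s j (by simp [hj]))

theorem pvInnerCast (cs : List Char) (i : Nat) (s2 : Nat × Nat) (j : Nat) (hij : i ≤ j) :
    (fun (st2 : Int × Int) (j : Int) =>
      let t := PySem.List.slice cs (some (i : Int)) (some (j + 1))
      if t.reverse = t then
        if st2.1 < j - (i : Int) + 1 then (j - (i : Int) + 1, (i : Int)) else st2
      else st2) ((s2.1 : Int), (s2.2 : Int)) (j : Int) =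
      (((pvStepN cs i s2 j).1 : Int), ((pvStepN cs i s2 j).2 : Int)) := by
  have hcast : ((j : Int) + 1) = ((j + 1 : Nat) : Int) := by push_cast; ring
  have hslice : PySem.List.slice cs (some (i : Int)) (some ((j : Int) + 1)) =
      (cs.drop i).take (j + 1 - i) := by
    rw [hcast, PySem.List.slice_natCast]
  simp only [pvStepN, hslice]
  by_cases ht : ((cs.drop i).take (j + 1 - i)).reverse = (cs.drop i).take (j + 1 - i)
  · rw [if_pos ht, if_pos ht]
    by_cases h2 : s2.1 < j - i + 1
    · rw [if_pos (by omega : (s2.1 : Int) < (j : Int) - (i : Int) + 1), if_pos h2]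
      refine Prod.ext ?_ rfl
      simp only
      omega
    · rw [if_neg (by omega : ¬ (s2.1 : Int) < (j : Int) - (i : Int) + 1), if_neg h2]
  · rw [if_neg ht, if_neg ht]

theorem pvFindA_eq (cs : List Char) :
    pvFindA cs = (((pvFindB cs).2 : Int), ((pvFindB cs).1 : Int)) := by
  have hmain : pvFindA cs = (((pvFindAN cs).1 : Int), ((pvFindAN cs).2 : Int)) := by
    unfold pvFindA pvFindAN
    have h0 : PySem.List.pyRange 0 cs.length 1 =
        List.map (fun k : Nat => (k : Int)) (List.range cs.length) := by
      have := pvRangeCast 0 cs.length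
      simpa [List.range_eq_range'] using this
    rw [h0]
    have hz : ((0 : Int), (0 : Int)) = ((((0, 0) : Nat × Nat).1 : Int), (((0, 0) : Nat × Nat).2 : Int)) := rfl
    rw [hz]
    refine pvFoldlCast _ _ (List.range cs.length) (0, 0) ?_
    intro s i _
    simp only
    have e : ((i : Int) + (s.1 : Int)) = ((i + s.1 : Nat) : Int) := by push_cast; ring
    rw [e, pvRangeCast (i + s.1) cs.length]
    refine pvFoldlCast _ _ (List.range' (i + s.1) (cs.length - (i + s.1))) s ?_
    intro s2 j hj
    have hij : i ≤ j := by
      rw [List.mem_range'_1] at hj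
      omega
    exact pvInnerCast cs i s2 j hij
  rw [hmain, pvFindAN_eq cs]

-- ===== VERDICT (by name: the statement is the Claim_ definition above) =====
theorem remove_repeated_palindrome_spec : Claim_equal_remove_repeated_palindrome := by
  intro s _
  unfold Spec_remove_repeated_palindrome
  unfold remove_repeated_palindrome remove_repeated_palindrome_alt
  have key : PySem.List.slice s.toList (some ((pvFindA s.toList).2))
      (some ((pvFindA s.toList).2 + (pvFindA s.toList).1)) =
      (s.toList.drop (pvFindB s.toList).1).take (pvFindB s.toList).2 := by
    rw [pvFindA_eq s.toList]
    simp only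
    have e : ((pvFindB s.toList).1 : Int) + ((pvFindB s.toList).2 : Int) =
        (((pvFindB s.toList).1 + (pvFindB s.toList).2 : Nat) : Int) := by push_cast; ring
    rw [e, PySem.List.slice_natCast]
    congr 1
    omega
  simp only [key]
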